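-- pv_equiv track=rewrite | github.com/203411/inteligencia-artificial | C3/Genetico/DNA.py | buscar_repetidos
-- ===== SOURCE A (Python) =====
-- def buscar_repetidos(individuo):
--     repetidos = []
--     for i in range(len(individuo)):
--         for j in range(i+1, len(individuo)):
--             if(individuo[i] == individuo[j]):
--                 repetido = individuo[i], i
--                 repetidos.append(repetido)
--     return repetidos
-- ===== SOURCE B (Python) =====
-- def buscar_repetidos(individuo):
--     # one pass with a pre-built count of remaining occurrences (O(n + output))
--     rem = {}
--     for v in individuo:
--         rem[v] = rem.get(v, 0) + 1
--     repetidos = []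
--     for i, v in enumerate(individuo):
--         rem[v] -= 1
--         repetidos.extend([(v, i)] * rem[v])
--     return repetidos
-- ===== Notes on version B (the rewrite author's own statement) =====
-- stated objective: faster
-- what changed: Replaced the nested all-pairs index scan with a single pass that pre-builds a dict of occurrence counts and, per position, appends (value, i) once per remaining later equal occurrence.
import Mathlib
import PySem

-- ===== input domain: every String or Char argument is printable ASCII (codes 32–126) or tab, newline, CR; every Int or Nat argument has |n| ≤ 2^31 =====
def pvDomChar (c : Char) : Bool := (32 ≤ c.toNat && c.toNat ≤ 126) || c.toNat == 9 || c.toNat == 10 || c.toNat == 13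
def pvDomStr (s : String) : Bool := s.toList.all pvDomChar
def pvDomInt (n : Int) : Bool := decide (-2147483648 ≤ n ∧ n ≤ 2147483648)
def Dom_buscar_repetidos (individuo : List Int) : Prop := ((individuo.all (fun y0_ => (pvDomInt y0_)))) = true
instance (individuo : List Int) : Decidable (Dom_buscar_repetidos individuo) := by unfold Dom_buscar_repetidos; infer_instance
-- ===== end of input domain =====

-- B replaces A's nested all-pairs index scan by one pass over enumerate(individuo)
-- with a pre-built dict of remaining occurrence counts (objective: faster).

-- ===== PORT A =====
-- literal port of A's two nested index loops; indices come from range(len(individuo)),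
-- so individuo[i] / individuo[j] never raise and pyGetD is exact here
def buscar_repetidos (individuo : List Int) : List (Int × Int) :=
  (PySem.List.pyRange 0 (individuo.length : Int)).foldl
    (fun repetidos i =>
      (PySem.List.pyRange (i + 1) (individuo.length : Int)).foldl
        (fun repetidos j =>
          if PySem.List.pyGetD individuo i 0 == PySem.List.pyGetD individuo j 0 then
            repetidos ++ [(PySem.List.pyGetD individuo i 0, i)]
          else repetidos)
        repetidos)
    []

-- ===== PORT B =====
-- port of Source B: build the count dict, then one fold over enumerate(individuo);
-- 'rem[v] -= 1' is Dict.modify with default 0 (exact: the key is always present)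
def buscar_repetidos_alt (individuo : List Int) : List (Int × Int) :=
  let rem : PySem.Dict Int Int :=
    individuo.foldl (fun d v => d.insert v (d.getD v 0 + 1)) PySem.Dict.empty
  ((PySem.List.enumerate individuo).foldl
    (fun (st : PySem.Dict Int Int × List (Int × Int)) p =>
      let d := st.1.modify p.2 0 (· - 1)
      (d, st.2 ++ PySem.List.pyRepeat [(p.2, p.1)] (d.getD p.2 0)))
    (rem, [])).2

-- ===== PRECONDITION & SPEC =====
def Spec_buscar_repetidos (individuo : List Int) (out : List (Int × Int)) : Prop := out = buscar_repetidos_alt individuo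
instance (individuo : List Int) (out : List (Int × Int)) : Decidable (Spec_buscar_repetidos individuo out) := by unfold Spec_buscar_repetidos; infer_instance

-- ===== CLAIM (what is proved, stated in full; the proofs are below) =====
def Claim_equal_buscar_repetidos : Prop := ∀ (individuo : List Int), Dom_buscar_repetidos individuo → Spec_buscar_repetidos individuo (buscar_repetidos individuo)

-- ===== LEMMAS AND PROOFS =====

-- canonical result: for the suffix starting at index i, one replicate block per element
def repSpec : List Int → Int → List (Int × Int)
  | [], _ => []
  | v :: t, i => List.replicate (t.count v) (v, i) ++ repSpec t (i + 1)

-- counting the indices of later elements equal to v equals a count on the suffix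
lemma countP_pyRange (l : List Int) (v : Int) :
    ∀ (k a : Nat), l.length = a + k →
      ((PySem.List.pyRange (a : Int) (l.length : Int)).countP
        (fun j => v == PySem.List.pyGetD l j 0)) = (l.drop a).count v := by
  intro k
  induction k with
  | zero =>
    intro a h
    rw [PySem.List.pyRange_one_eq_nil (by omega), List.drop_eq_nil_of_le (by omega)]
    simp
  | succ k ih =>
    intro a h
    have ha : a < l.length := by omega
    rw [PySem.List.pyRange_one_cons (by exact_mod_cast ha)]
    rw [List.countP_cons]
    have : ((a : Int) + 1) = ((a + 1 : Nat) : Int) := by push_cast; ring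
    rw [this, ih (a + 1) (by omega)]
    rw [← List.getElem_cons_drop ha, List.count_cons]
    simp only [PySem.List.pyGetD_natCast, List.getD_eq_getElem l 0 ha]
    by_cases hv : v = l[a]
    · simp [hv]
    · simp [hv, Ne.symm hv]

-- A's per-index blocks over the index range from a form repSpec on the suffix from a
lemma A_flatMap (l : List Int) :
    ∀ (k a : Nat), l.length = a + k →
      ((PySem.List.pyRange (a : Int) (l.length : Int)).flatMap
        (fun i => ((PySem.List.pyRange (i + 1) (l.length : Int)).filter
            (fun j => PySem.List.pyGetD l i 0 == PySem.List.pyGetD l j 0)).map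
            (fun _ => (PySem.List.pyGetD l i 0, i)))) = repSpec (l.drop a) (a : Int) := by
  intro k
  induction k with
  | zero =>
    intro a h
    rw [PySem.List.pyRange_one_eq_nil (by omega), List.drop_eq_nil_of_le (by omega)]
    simp [repSpec]
  | succ k ih =>
    intro a h
    have ha : a < l.length := by omega
    rw [PySem.List.pyRange_one_cons (by exact_mod_cast ha), List.flatMap_cons]
    have hcast : ((a : Int) + 1) = ((a + 1 : Nat) : Int) := by push_cast; ring
    rw [hcast, ih (a + 1) (by omega)]
    have hblock :
        ((PySem.List.pyRange ((a + 1 : Nat) : Int) (l.length : Int)).filter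
            (fun j => PySem.List.pyGetD l (a : Int) 0 == PySem.List.pyGetD l j 0)).map
            (fun _ => (PySem.List.pyGetD l (a : Int) 0, (a : Int)))
          = List.replicate ((l.drop (a + 1)).count l[a]) (l[a], (a : Int)) := by
      rw [List.map_const', ← List.countP_eq_length_filter]
      rw [countP_pyRange l _ k (a + 1) (by omega)]
      simp [PySem.List.pyGetD_natCast, List.getD, List.getElem?_eq_getElem ha]
    rw [hblock, ← List.getElem_cons_drop ha]
    simp [repSpec]

lemma A_eq_repSpec (l : List Int) : buscar_repetidos l = repSpec l 0 := by
  unfold buscar_repetidos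
  rw [PySem.List.foldl_congr_mem _ _
      (fun acc i => acc ++ ((PySem.List.pyRange (i + 1) (l.length : Int)).filter
          (fun j => PySem.List.pyGetD l i 0 == PySem.List.pyGetD l j 0)).map
          (fun _ => (PySem.List.pyGetD l i 0, i))) _
      (fun acc i _ => PySem.List.foldl_append_if _ _ _ _)]
  rw [PySem.List.foldl_append_eq_flatMap]
  have := A_flatMap l l.length 0 (by omega)
  simpa using this

-- B's loop invariant: the dict holds, for every value, its count in the unprocessed suffix
lemma B_loop (step : PySem.Dict Int Int × List (Int × Int) → Int × Int → PySem.Dict Int Int × List (Int × Int))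
    (hstep : step = fun st p =>
      let d := st.1.modify p.2 0 (· - 1)
      (d, st.2 ++ PySem.List.pyRepeat [(p.2, p.1)] (d.getD p.2 0))) :
    ∀ (suf : List Int) (i : Int) (acc : List (Int × Int)) (d : PySem.Dict Int Int),
      (∀ w, d.getD w 0 = (suf.count w : Int)) →
      ((PySem.List.enumerate suf i).foldl step (d, acc)).2 = acc ++ repSpec suf i := by
  intro suf
  induction suf with
  | nil => intro i acc d h; simp [PySem.List.enumerate, repSpec]
  | cons v t ih =>
    intro i acc d h
    rw [PySem.List.enumerate_cons, List.foldl_cons]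
    have hv : (d.modify v 0 (· - 1)).getD v 0 = (t.count v : Int) := by
      rw [PySem.Dict.getD_modify_self, h v]
      simp [List.count_cons_self]
    have hst : step (d, acc) (i, v)
        = (d.modify v 0 (· - 1), acc ++ List.replicate (t.count v) (v, i)) := by
      rw [hstep]; simp only
      rw [hv, PySem.List.pyRepeat_singleton, Int.toNat_natCast]
    rw [hst, ih (i + 1) _ _ ?_]
    · simp [repSpec, List.append_assoc]
    · intro w
      rw [PySem.Dict.getD_modify]
      by_cases hw : w = v
      · subst hw; rw [if_pos rfl, h w]; simp [List.count_cons_self]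
      · rw [if_neg hw, h w]; simp [List.count_cons]; omega

lemma B_eq_repSpec (l : List Int) : buscar_repetidos_alt l = repSpec l 0 := by
  unfold buscar_repetidos_alt
  rw [B_loop _ rfl]
  · simp
  · intro w
    rw [PySem.Dict.getD_foldl_insert_add_one]
    simp [PySem.Dict.getD_empty]

-- ===== VERDICT (by name: the statement is the Claim_ definition above) =====
theorem buscar_repetidos_spec : Claim_equal_buscar_repetidos := by
  intro l _
  unfold Spec_buscar_repetidos
  rw [A_eq_repSpec, B_eq_repSpec]
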